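-- pv_equiv track=rewrite | github.com/1339190177/routa | scripts/generate-specialist-docs.py | first_prompt_paragraph
-- ===== SOURCE A (Python) =====
-- def first_prompt_paragraph(prompt):
--     lines = [line.rstrip() for line in prompt.splitlines()]
--     paragraphs = []
--     current = []
--     for line in lines:
--         stripped = line.strip()
--         if not stripped:
--             if current:
--                 paragraphs.append(" ".join(current))
--                 current = []
--             continue
--         if stripped.startswith("## "):
--             continue
--         current.append(stripped)
--     if current:
--         paragraphs.append(" ".join(current))
--     return paragraphs[0] if paragraphs else ""
-- ===== SOURCE B (Python) =====
-- def first_prompt_paragraph(prompt):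
--     kept = [line.strip() for line in prompt.splitlines()
--             if not line.strip().startswith("## ")]
--     i = 0
--     while i < len(kept) and not kept[i]:
--         i += 1
--     j = i
--     while j < len(kept) and kept[j]:
--         j += 1
--     return " ".join(kept[i:j])
-- ===== Notes on version B (the rewrite author's own statement) =====
-- stated objective: simpler
-- what changed: Replaces the stateful accumulate-and-flush pass that builds every paragraph with a filter of header lines followed by a scan that locates just the first non-blank run and joins it.
import Mathlib
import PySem

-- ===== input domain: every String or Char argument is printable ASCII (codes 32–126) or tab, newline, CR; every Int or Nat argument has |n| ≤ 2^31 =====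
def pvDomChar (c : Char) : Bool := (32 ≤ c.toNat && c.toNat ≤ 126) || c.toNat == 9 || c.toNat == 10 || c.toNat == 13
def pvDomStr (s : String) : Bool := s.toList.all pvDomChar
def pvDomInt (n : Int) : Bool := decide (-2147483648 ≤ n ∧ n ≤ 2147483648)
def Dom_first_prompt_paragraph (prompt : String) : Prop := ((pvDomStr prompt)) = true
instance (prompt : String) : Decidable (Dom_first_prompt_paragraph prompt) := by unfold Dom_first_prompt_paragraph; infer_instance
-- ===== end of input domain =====

-- B replaces A's accumulate-and-flush paragraph builder with filter-headers then
-- take-the-first-non-blank-run; objective: simpler (same O(n) cost).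

-- ===== PORT A =====
def first_prompt_paragraph (prompt : String) : String :=
  let lines := (PySem.Str.splitlines prompt).map (fun line => PySem.Str.rstrip line)
  let st := lines.foldl (fun (st : List String × List String) line =>
      let stripped := PySem.Str.strip line
      if stripped = "" then
        if st.2 ≠ [] then (st.1 ++ [PySem.Str.join " " st.2], ([] : List String)) else st
      else if PySem.Str.startswith stripped "## " then st
      else (st.1, st.2 ++ [stripped]))
    (([] : List String), ([] : List String))
  let paragraphs := if st.2 ≠ [] then st.1 ++ [PySem.Str.join " " st.2] else st.1
  paragraphs.headD ""

-- ===== PORT B =====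
def first_prompt_paragraph_alt (prompt : String) : String :=
  let kept := ((PySem.Str.splitlines prompt).map PySem.Str.strip).filter
      (fun s => !(PySem.Str.startswith s "## "))
  PySem.Str.join " " ((kept.dropWhile (fun s => s == "")).takeWhile (fun s => s != ""))

-- ===== PRECONDITION & SPEC =====
def Spec_first_prompt_paragraph (prompt : String) (out : String) : Prop := out = first_prompt_paragraph_alt prompt
instance (prompt : String) (out : String) : Decidable (Spec_first_prompt_paragraph prompt out) := by unfold Spec_first_prompt_paragraph; infer_instance

-- ===== CLAIM (what is proved, stated in full; the proofs are below) =====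
def Claim_equal_first_prompt_paragraph : Prop := ∀ (prompt : String), Dom_first_prompt_paragraph prompt → Spec_first_prompt_paragraph prompt (first_prompt_paragraph prompt)

-- ===== LEMMAS AND PROOFS =====

-- A's loop body, acting on the already-stripped line
def pvStep (st : List String × List String) (s : String) : List String × List String :=
  if s = "" then
    if st.2 ≠ [] then (st.1 ++ [PySem.Str.join " " st.2], ([] : List String)) else st
  else if PySem.Str.startswith s "## " then st
  else (st.1, st.2 ++ [s])

def pvFinish (st : List String × List String) : String :=
  (if st.2 ≠ [] then st.1 ++ [PySem.Str.join " " st.2] else st.1).headD ""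

theorem pv_dropWhile_idem (p : Char → Bool) (l : List Char) :
    List.dropWhile p (List.dropWhile p l) = List.dropWhile p l := by
  induction l with
  | nil => simp
  | cons c t ih =>
    by_cases h : p c = true
    · simp [h, ih]
    · simp [h]

theorem pv_rstrip_cons (c : Char) (t : List Char) :
    PySem.Chars.rstrip (c :: t) =
      if PySem.Chars.rstrip t = [] then
        (if PySem.Chars.isspace c then [] else [c])
      else c :: PySem.Chars.rstrip t := by
  simp only [PySem.Chars.rstrip, List.reverse_cons, List.dropWhile_append]
  by_cases h : List.dropWhile PySem.Chars.isspace t.reverse = []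
  · simp [h, List.dropWhile]
    by_cases hc : PySem.Chars.isspace c <;> simp [hc]
  · simp [h, List.isEmpty_iff, List.reverse_eq_nil_iff]

theorem pv_lstrip_cons (c : Char) (t : List Char) :
    PySem.Chars.lstrip (c :: t) =
      if PySem.Chars.isspace c = true then PySem.Chars.lstrip t else c :: t := by
  simp [PySem.Chars.lstrip, List.dropWhile_cons]

theorem pv_lstrip_rstrip_comm (l : List Char) :
    PySem.Chars.lstrip (PySem.Chars.rstrip l) = PySem.Chars.rstrip (PySem.Chars.lstrip l) := by
  induction l with
  | nil => simp [PySem.Chars.lstrip, PySem.Chars.rstrip]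
  | cons c t ih =>
    by_cases hr : PySem.Chars.rstrip t = []
    · have hall : ∀ x ∈ t, PySem.Chars.isspace x = true := by
        have h' : List.dropWhile PySem.Chars.isspace t.reverse = [] := by
          simpa [PySem.Chars.rstrip, List.reverse_eq_nil_iff] using hr
        intro x hx
        exact List.dropWhile_eq_nil_iff.1 h' x (List.mem_reverse.2 hx)
      have hl : PySem.Chars.lstrip t = [] :=
        List.dropWhile_eq_nil_iff.2 hall
      rw [pv_rstrip_cons, if_pos hr, pv_lstrip_cons]
      by_cases hc : PySem.Chars.isspace c = true
      · rw [if_pos hc, if_pos hc, hl]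
        simp [PySem.Chars.lstrip, PySem.Chars.rstrip]
      · rw [if_neg hc, if_neg hc, pv_rstrip_cons, if_pos hr, if_neg hc]
        simp [PySem.Chars.lstrip, hc]
    · rw [pv_rstrip_cons, if_neg hr, pv_lstrip_cons, pv_lstrip_cons]
      by_cases hc : PySem.Chars.isspace c = true
      · rw [if_pos hc, if_pos hc]
        exact ih
      · rw [if_neg hc, if_neg hc, pv_rstrip_cons, if_neg hr]

theorem pv_rstrip_idem (l : List Char) :
    PySem.Chars.rstrip (PySem.Chars.rstrip l) = PySem.Chars.rstrip l := by
  simp [PySem.Chars.rstrip, pv_dropWhile_idem]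

theorem pv_strip_rstrip (l : List Char) :
    PySem.Chars.strip (PySem.Chars.rstrip l) = PySem.Chars.strip l := by
  simp only [PySem.Chars.strip]
  rw [pv_lstrip_rstrip_comm, pv_rstrip_idem]

theorem pv_str_strip_rstrip (s : String) :
    PySem.Str.strip (PySem.Str.rstrip s) = PySem.Str.strip s := by
  simp [PySem.Str.strip, PySem.Str.rstrip, pv_strip_rstrip]

theorem pv_startswith_ne_empty {s : String} (h : PySem.Str.startswith s "## " = true) :
    s ≠ "" := by
  intro he
  subst he
  simp [PySem.Str.startswith, PySem.Chars.startswith] at h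

-- A header line leaves A's state unchanged, so folding over the filtered list is the same
theorem pv_step_header {s : String} (st : List String × List String)
    (h : PySem.Str.startswith s "## " = true) : pvStep st s = st := by
  unfold pvStep
  rw [if_neg (pv_startswith_ne_empty h), if_pos h]

theorem pv_step_plain {s : String} (st : List String × List String)
    (hs : ¬ s = "") (h : PySem.Str.startswith s "## " = false) :
    pvStep st s = (st.1, st.2 ++ [s]) := by
  unfold pvStep
  rw [if_neg hs, if_neg (by rw [h]; exact Bool.false_ne_true)]

theorem pv_fold_filter (ss : List String) (st : List String × List String) :
    ss.foldl pvStep st =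
      (ss.filter (fun s => !(PySem.Str.startswith s "## "))).foldl pvStep st := by
  induction ss generalizing st with
  | nil => rfl
  | cons s t ih =>
    by_cases h : PySem.Str.startswith s "## " = true
    · rw [List.foldl_cons,
        List.filter_cons_of_neg (by show ¬ ((!(PySem.Str.startswith s "## ")) = true); rw [h]; simp),
        pv_step_header st h]
      exact ih st
    · have hf : PySem.Str.startswith s "## " = false := by
        cases hb : PySem.Str.startswith s "## " with
        | false => rfl
        | true => exact absurd hb h
      rw [List.foldl_cons,
        List.filter_cons_of_pos (by show (!(PySem.Str.startswith s "## ")) = true; rw [hf]; rfl),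
        List.foldl_cons]
      exact ih _

-- Once a paragraph has been flushed, the first paragraph never changes again
theorem pv_fold_head (ks : List String) (p : String) (ps cur : List String) :
    pvFinish (ks.foldl pvStep (p :: ps, cur)) = p := by
  induction ks generalizing ps cur with
  | nil =>
    by_cases h : cur = [] <;> simp [pvFinish, h]
  | cons s t ih =>
    rw [List.foldl_cons]
    by_cases hs : s = ""
    · by_cases hc : cur = []
      · rw [show pvStep (p :: ps, cur) s = (p :: ps, cur) by
          unfold pvStep; rw [if_pos hs, if_neg (by simp [hc])]]
        exact ih ps cur
      · rw [show pvStep (p :: ps, cur) s = (p :: (ps ++ [PySem.Str.join " " cur]), []) by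
          unfold pvStep; rw [if_pos hs, if_pos (by simp [hc])]; rfl]
        exact ih _ _
    · by_cases hh : PySem.Str.startswith s "## " = true
      · rw [pv_step_header _ hh]
        exact ih ps cur
      · have hf : PySem.Str.startswith s "## " = false := by
          cases hb : PySem.Str.startswith s "## " with
          | false => rfl
          | true => exact absurd hb hh
        rw [pv_step_plain _ hs hf]
        exact ih ps (cur ++ [s])

-- While the first paragraph is being accumulated
theorem pv_fold_accum (ks : List String) (cur : List String)
    (hks : ∀ s ∈ ks, PySem.Str.startswith s "## " = false) (hc : cur ≠ []) :
    pvFinish (ks.foldl pvStep ([], cur)) =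
      PySem.Str.join " " (cur ++ ks.takeWhile (fun s => s != "")) := by
  induction ks generalizing cur with
  | nil => simp [pvFinish, hc]
  | cons s t ih =>
    rw [List.foldl_cons]
    by_cases hs : s = ""
    · rw [show pvStep ([], cur) s = ([PySem.Str.join " " cur], []) by
        unfold pvStep; rw [if_pos hs, if_pos (by simp [hc])]; rfl]
      rw [pv_fold_head]
      subst hs
      rw [List.takeWhile_cons_of_neg (by simp)]
      simp
    · rw [pv_step_plain _ hs (hks s (by simp))]
      show pvFinish (t.foldl pvStep ([], cur ++ [s])) = _
      rw [ih (cur ++ [s]) (fun x hx => hks x (by simp [hx])) (by simp)]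
      rw [List.takeWhile_cons_of_pos (by simp [hs])]
      simp

-- Skipping the leading blank lines
theorem pv_fold_main (ks : List String)
    (hks : ∀ s ∈ ks, PySem.Str.startswith s "## " = false) :
    pvFinish (ks.foldl pvStep ([], [])) =
      PySem.Str.join " "
        ((ks.dropWhile (fun s => s == "")).takeWhile (fun s => s != "")) := by
  induction ks with
  | nil => simp [pvFinish, PySem.Str.join, PySem.Chars.join]; rfl
  | cons s t ih =>
    rw [List.foldl_cons]
    by_cases hs : s = ""
    · rw [show pvStep ([], []) s = ([], []) by
        unfold pvStep; rw [if_pos hs, if_neg (by simp)]]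
      rw [ih (fun x hx => hks x (by simp [hx]))]
      rw [List.dropWhile_cons_of_pos (by simp [hs])]
    · rw [pv_step_plain _ hs (hks s (by simp))]
      show pvFinish (t.foldl pvStep ([], [s])) = _
      rw [pv_fold_accum t [s] (fun x hx => hks x (by simp [hx])) (by simp)]
      rw [List.dropWhile_cons_of_neg (by simp [hs]),
        List.takeWhile_cons_of_pos (by simp [hs])]
      simp

-- A's body, written with the named loop step (definitional)
theorem pv_A_eq (prompt : String) :
    first_prompt_paragraph prompt =
      pvFinish (((PySem.Str.splitlines prompt).map (fun l => PySem.Str.rstrip l)).foldl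
        (fun st line => pvStep st (PySem.Str.strip line)) ([], [])) := rfl

theorem pv_fold_strip (ls : List String) (st : List String × List String) :
    (ls.map (fun l => PySem.Str.rstrip l)).foldl
        (fun st line => pvStep st (PySem.Str.strip line)) st
      = (ls.map PySem.Str.strip).foldl pvStep st := by
  induction ls generalizing st with
  | nil => rfl
  | cons l t ih =>
    simp only [List.map_cons, List.foldl_cons]
    rw [pv_str_strip_rstrip]
    exact ih _

-- ===== VERDICT (by name: the statement is the Claim_ definition above) =====
theorem first_prompt_paragraph_spec : Claim_equal_first_prompt_paragraph := by
  intro prompt _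
  show first_prompt_paragraph prompt = first_prompt_paragraph_alt prompt
  rw [pv_A_eq, pv_fold_strip, pv_fold_filter,
    pv_fold_main _ (by
      intro s hs
      have h2 := (List.mem_filter.1 hs).2
      simp at h2 ⊢
      exact h2)]
  rfl
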